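-- pv_equiv track=rewrite | github.com/SlimRunner/advent-of-code | year-2022/10-day/solve.py | getSum
-- ===== SOURCE A (Python) =====
-- def getSum(args):
--   x = 1
--   st = 0
--   for i, op in enumerate(args):
--     if op is not None:
--       x += op
--     if (i + 21) % 40 == 0:
--       st += (i + 1) * x
--   return st
-- ===== SOURCE B (Python) =====
-- def getSum(args):
--     # two phases: build all register states first, then sample every 40th cycle
--     states = [1]
--     x = 1
--     for op in args:
--         x += op or 0
--         states.append(x)
--     return sum((i + 1) * states[i + 1] for i in range(19, len(args), 40))
-- ===== Notes on version B (the rewrite author's own statement) =====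
-- stated objective: alternative
-- what changed: Replaces the single pass that checks (i+21)%40==0 at every element by two phases: an accumulation pass building the full list of register states, then a stride-40 sampling loop over only the probed cycles.
import Mathlib
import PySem

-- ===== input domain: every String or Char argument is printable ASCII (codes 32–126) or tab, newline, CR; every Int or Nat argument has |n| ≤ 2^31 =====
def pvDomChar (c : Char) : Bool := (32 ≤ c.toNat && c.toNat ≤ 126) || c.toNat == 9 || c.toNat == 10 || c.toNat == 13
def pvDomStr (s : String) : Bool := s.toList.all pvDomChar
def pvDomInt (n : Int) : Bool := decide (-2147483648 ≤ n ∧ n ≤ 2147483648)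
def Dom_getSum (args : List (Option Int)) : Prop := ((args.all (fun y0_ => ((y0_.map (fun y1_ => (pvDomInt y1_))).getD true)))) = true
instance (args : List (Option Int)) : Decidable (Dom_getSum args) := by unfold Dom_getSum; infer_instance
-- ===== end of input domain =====

-- B changes the decomposition (accumulate-all-states, then stride-40 sampling); same cost, return value proved equal.

-- ===== PORT A =====
-- one step of A's loop body: x update (only when op is not None), then the modular-cycle check
def stepA (s : Int × Int) (p : Int × Option Int) : Int × Int :=
  let x := match p.2 with
    | some v => s.1 + v
    | none => s.1
  let st := if PySem.Int.mod (p.1 + 21) 40 = 0 then s.2 + (p.1 + 1) * x else s.2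
  (x, st)

def getSum (args : List (Option Int)) : Int :=
  ((PySem.List.enumerate args 0).foldl stepA (1, 0)).2

-- ===== PORT B =====
-- one step of B's accumulation phase: append the new register value ('op or 0')
def stepB (p : List Int × Int) (op : Option Int) : List Int × Int :=
  let x := p.2 + op.getD 0
  (p.1 ++ [x], x)

def getSum_alt (args : List (Option Int)) : Int :=
  let states := (args.foldl stepB ([1], 1)).1
  (PySem.List.pyRange 19 (args.length : Int) 40).foldl
    (fun s i => s + (i + 1) * PySem.List.pyGetD states (i + 1) 0) 0

-- ===== PRECONDITION & SPEC =====
def Spec_getSum (args : List (Option Int)) (out : Int) : Prop := out = getSum_alt args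
instance (args : List (Option Int)) (out : Int) : Decidable (Spec_getSum args out) := by unfold Spec_getSum; infer_instance

-- ===== CLAIM (what is proved, stated in full; the proofs are below) =====
def Claim_equal_getSum : Prop := ∀ (args : List (Option Int)), Dom_getSum args → Spec_getSum args (getSum args)

-- ===== LEMMAS AND PROOFS =====

-- proof-side: list of register values after each instruction, starting from x
def pfx (x : Int) : List (Option Int) → List Int
  | [] => []
  | op :: t => (x + op.getD 0) :: pfx (x + op.getD 0) t

theorem length_pfx (l : List (Option Int)) (x : Int) : (pfx x l).length = l.length := by
  induction l generalizing x with
  | nil => simp [pfx]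
  | cons op t ih => simp [pfx, ih]

theorem foldl_stepB_eq (l : List (Option Int)) (st : List Int) (x : Int) :
    l.foldl stepB (st, x) = (st ++ pfx x l, x + (l.map (fun o => o.getD 0)).sum) := by
  induction l generalizing st x with
  | nil => simp [pfx]
  | cons op t ih =>
    simp only [List.foldl_cons, stepB, pfx, ih, List.map_cons, List.sum_cons, Prod.mk.injEq]
    exact ⟨by simp, by ring⟩

theorem pfx_getElem (l : List (Option Int)) (x : Int) (j : Nat) (h : j < l.length) :
    (pfx x l)[j]'(by rw [length_pfx]; exact h) =
      x + ((l.map (fun o => o.getD 0)).take (j + 1)).sum := by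
  induction l generalizing x j with
  | nil => simp at h
  | cons op t ih =>
    cases j with
    | zero => simp [pfx]
    | succ k =>
      simp only [pfx, List.getElem_cons_succ, List.map_cons, List.take_succ_cons, List.sum_cons]
      rw [ih (x + op.getD 0) k (by simpa using h)]
      ring

theorem pyGetD_states (l : List (Option Int)) (i : Int) (h0 : 0 ≤ i) (h1 : i < (l.length : Int)) :
    PySem.List.pyGetD (1 :: pfx 1 l) (i + 1) 0 =
      1 + ((l.map (fun o => o.getD 0)).take (i.toNat + 1)).sum := by
  rw [PySem.List.pyGetD_eq_getElem (1 :: pfx 1 l) 0 (by omega)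
      (by simp [length_pfx]; omega)]
  have ht : (i + 1).toNat = i.toNat + 1 := by omega
  simp only [ht, List.getElem_cons_succ]
  exact pfx_getElem l 1 i.toNat (by omega)

theorem pyRange_snoc40 (n : Int) (hn : 0 ≤ n) :
    PySem.List.pyRange 19 (n + 1) 40 =
      PySem.List.pyRange 19 n 40 ++ (if (n + 21) % 40 = 0 then [n] else []) := by
  rw [PySem.List.pyRange_of_pos 19 (n + 1) (by norm_num),
      PySem.List.pyRange_of_pos 19 n (by norm_num)]
  by_cases h : (n + 21) % 40 = 0
  · obtain ⟨q, hq⟩ := Int.dvd_of_emod_eq_zero h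
    have hc : (if (19:Int) < n + 1 then ((n + 1 - 19 + 40 - 1) / 40).toNat else 0) =
        (if (19:Int) < n then ((n - 19 + 40 - 1) / 40).toNat else 0) + 1 := by
      split_ifs <;> omega
    rw [if_pos h]
    rw [show (if (19:Int) < n + 1 then ((n + 1 - 19 + 40 - 1) / 40).toNat else 0) =
        (if (19:Int) < n then ((n - 19 + 40 - 1) / 40).toNat else 0) + 1 from hc]
    rw [List.range_succ, List.map_append]
    have he : (19:Int) + 40 * ((if (19:Int) < n then ((n - 19 + 40 - 1) / 40).toNat else 0) : Nat) = n := by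
      split_ifs <;> push_cast <;> omega
    simp only [List.map_cons, List.map_nil, he]
  · rw [if_neg h, List.append_nil]
    have hc : (if (19:Int) < n + 1 then ((n + 1 - 19 + 40 - 1) / 40).toNat else 0) =
        (if (19:Int) < n then ((n - 19 + 40 - 1) / 40).toNat else 0) := by
      split_ifs <;> omega
    rw [hc]

theorem fmod_cond (m : Int) : (PySem.Int.mod m 40 = 0) ↔ (m % 40 = 0) := by
  simp [PySem.Int.mod, Int.fmod_eq_emod]

theorem main_lemma (args : List (Option Int)) :
    (PySem.List.enumerate args 0).foldl stepA (1, 0) =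
      (1 + (args.map (fun o => o.getD 0)).sum, getSum_alt args) := by
  induction args using List.reverseRecOn with
  | nil => decide
  | append_singleton l a ih =>
    rw [PySem.List.enumerate_append, List.foldl_append, ih]
    have hstates : (l ++ [a]).foldl stepB ([1], 1) =
        ([1] ++ pfx 1 (l ++ [a]), 1 + ((l ++ [a]).map (fun o => o.getD 0)).sum) :=
      foldl_stepB_eq _ _ _
    -- unfold both sides
    simp only [PySem.List.enumerate, List.foldl_cons, List.foldl_nil]
    unfold getSum_alt
    rw [hstates]
    simp only []
    have hlen : ((l ++ [a]).length : Int) = (l.length : Int) + 1 := by simp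
    rw [hlen, pyRange_snoc40 (l.length : Int) (by positivity), List.foldl_append]
    -- first part of the fold: states of (l ++ [a]) agree with states of l on indices < length l
    have hcongr : ∀ (init : Int),
        (PySem.List.pyRange 19 (l.length : Int) 40).foldl
          (fun s i => s + (i + 1) * PySem.List.pyGetD ([1] ++ pfx 1 (l ++ [a])) (i + 1) 0) init =
        (PySem.List.pyRange 19 (l.length : Int) 40).foldl
          (fun s i => s + (i + 1) * PySem.List.pyGetD ((l.foldl stepB ([1], 1)).1) (i + 1) 0) init := by
      intro init
      apply PySem.List.foldl_congr_mem
      intro acc i hi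
      obtain ⟨h19, hlt, -⟩ := (PySem.List.mem_pyRange_iff_of_pos (by norm_num) i).1 hi
      rw [foldl_stepB_eq]
      simp only [List.cons_append, List.nil_append]
      rw [pyGetD_states (l ++ [a]) i (by omega) (by simp; omega),
          pyGetD_states l i (by omega) hlt]
      rw [List.map_append, List.take_append_of_le_length (by simp; omega)]
    by_cases hc : ((l.length : Int) + 21) % 40 = 0
    · rw [if_pos hc]
      simp only [List.foldl_cons, List.foldl_nil]
      rw [hcongr]
      have hlast : PySem.List.pyGetD ([1] ++ pfx 1 (l ++ [a])) ((l.length : Int) + 1) 0 =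
          1 + ((l ++ [a]).map (fun o => o.getD 0)).sum := by
        simp only [List.cons_append, List.nil_append]
        rw [pyGetD_states (l ++ [a]) (l.length : Int) (by positivity) (by simp)]
        rw [List.take_of_length_le (by simp)]
      rw [hlast]
      have hA : ∀ st : Int, stepA (1 + (l.map (fun o => o.getD 0)).sum, st) ((0 : Int) + l.length, a)
          = (1 + ((l ++ [a]).map (fun o => o.getD 0)).sum,
             st + ((l.length : Int) + 1) * (1 + ((l ++ [a]).map (fun o => o.getD 0)).sum)) := by
        intro st
        cases a <;>
          simp only [stepA, Option.getD, zero_add, fmod_cond, if_pos hc, List.map_append,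
            List.sum_append, List.map_cons, List.map_nil, List.sum_cons, List.sum_nil,
            Prod.mk.injEq] <;>
          exact ⟨by ring, by ring⟩
      rw [hA]
    · rw [if_neg hc]
      simp only [List.foldl_nil]
      rw [hcongr]
      have hA : ∀ st : Int, stepA (1 + (l.map (fun o => o.getD 0)).sum, st) ((0 : Int) + l.length, a)
          = (1 + ((l ++ [a]).map (fun o => o.getD 0)).sum, st) := by
        intro st
        cases a <;>
          simp only [stepA, Option.getD, zero_add, fmod_cond, List.map_append, List.sum_append,
            List.map_cons, List.map_nil, List.sum_cons, List.sum_nil, if_neg hc,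
            Prod.mk.injEq] <;>
          exact ⟨by ring, trivial⟩
      rw [hA]

-- ===== VERDICT (by name: the statement is the Claim_ definition above) =====
theorem getSum_spec : Claim_equal_getSum := by
  intro args _
  unfold Spec_getSum getSum
  rw [main_lemma]
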